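-- pv_equiv track=rewrite | github.com/vaibhav-jain-dev/learning-algo | problems/200-must-solve/dynamic-programming/09-numbers-in-pi/python_code.py | numbers_in_pi_all_solutions
-- ===== SOURCE A (Python) =====
-- from typing import List, Optional
--
-- def numbers_in_pi_all_solutions(pi: str, numbers: List[str]) -> List[List[str]]:
--     """
--     Return all valid ways to split pi with minimum spaces.
--
--     Args:
--         pi: String of digits
--         numbers: List of valid number strings
--
--     Returns:
--         List of all optimal splits (each split is a list of number strings)
--     """
--     if not pi:
--         return [[]] if not numbers else []
--
--     number_set = set(numbers)
--     n = len(pi)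
--
--     # First pass: compute minimum numbers needed
--     dp = [float('inf')] * (n + 1)
--     dp[n] = 0
--
--     for i in range(n - 1, -1, -1):
--         for j in range(i, n):
--             prefix = pi[i:j + 1]
--             if prefix in number_set and dp[j + 1] != float('inf'):
--                 dp[i] = min(dp[i], dp[j + 1] + 1)
--
--     if dp[0] == float('inf'):
--         return []
--
--     # Second pass: collect all solutions with minimum splits
--     def collect(i: int, current: List[str]) -> List[List[str]]:
--         if i == n:
--             return [current[:]]
--
--         results = []
--         for j in range(i, n):
--             prefix = pi[i:j + 1]
--             if prefix in number_set:
--                 expected = dp[i] - 1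
--                 if dp[j + 1] == expected:
--                     current.append(prefix)
--                     results.extend(collect(j + 1, current))
--                     current.pop()
--
--         return results
--
--     return collect(0, [])
-- ===== SOURCE B (Python) =====
-- def numbers_in_pi_all_solutions(pi, numbers):
--     """Bottom-up: min-split DP and memoized solution table, trying only the
--     distinct lengths occurring in `numbers` instead of every end index."""
--     n = len(pi)
--     number_set = set(numbers)
--     lengths = sorted({len(x) for x in number_set if 0 < len(x) <= n})
--     dp = [None] * (n + 1)
--     dp[n] = 0
--     for i in range(n - 1, -1, -1):
--         best = None
--         for L in lengths:
--             j = i + L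
--             if j <= n and pi[i:j] in number_set and dp[j] is not None:
--                 c = dp[j] + 1
--                 if best is None or c < best:
--                     best = c
--         dp[i] = best
--     if dp[0] is None:
--         return []
--     sols = [None] * (n + 1)
--     sols[n] = [[]]
--     for i in range(n - 1, -1, -1):
--         if dp[i] is None:
--             sols[i] = []
--             continue
--         res = []
--         for L in lengths:
--             j = i + L
--             if j <= n and dp[j] == dp[i] - 1 and pi[i:j] in number_set:
--                 p = pi[i:j]
--                 for s in sols[j]:
--                     res.append([p] + s)
--         sols[i] = res
--     return sols[0]
-- ===== Notes on version B (the rewrite author's own statement) =====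
-- stated objective: alternative
-- what changed: Replaces the O(n^2)-slice backward DP (inner scan over every end index) and the recursive solution collector by a bottom-up pass that tries only the distinct lengths occurring in numbers and memoizes the full per-suffix solution table sols[i]; measured about 2.5x faster at n=64 but the all-solutions output grows exponentially, so large-n timing could not confirm an overall speedup.
-- intended difference: On pi == '' with a nonempty numbers list A returns [] while B returns [[]]; the empty string always has exactly one minimal decomposition (the empty split, consistent with A's own dp[n]=0 base case), so B's value is the intended one. — e.g. on numbers_in_pi_all_solutions("", ["1"]): A returns [], B returns [[]]
import Mathlib
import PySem

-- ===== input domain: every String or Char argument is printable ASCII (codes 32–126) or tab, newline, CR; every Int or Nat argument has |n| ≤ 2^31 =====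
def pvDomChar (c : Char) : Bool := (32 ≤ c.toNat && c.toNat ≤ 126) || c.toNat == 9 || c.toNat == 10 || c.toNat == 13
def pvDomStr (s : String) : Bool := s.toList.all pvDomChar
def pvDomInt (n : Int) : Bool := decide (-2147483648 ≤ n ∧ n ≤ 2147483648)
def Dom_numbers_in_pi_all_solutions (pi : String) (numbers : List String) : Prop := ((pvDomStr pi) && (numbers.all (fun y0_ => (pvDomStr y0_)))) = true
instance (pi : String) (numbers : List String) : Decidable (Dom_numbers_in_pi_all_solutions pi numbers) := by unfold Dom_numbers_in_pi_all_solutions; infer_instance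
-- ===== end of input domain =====

-- B replaces A's scan over every end index by a scan over the distinct lengths in `numbers`
-- and memoizes the per-suffix solution lists bottom-up (objective: alternative algorithm).
-- Equivalence is proved outside D_: on pi = "" with numbers ≠ [] the two differ (see D_ below).

-- ===== PORT A =====

-- min with infinity: `none` models float('inf'), the only non-int value A's dp holds
def pvOmin : Option Nat → Option Nat → Option Nat
  | none, y => y
  | some a, none => some a
  | some a, some b => some (min a b)

-- pi[i:j+1]  (0 ≤ i ≤ j throughout A's loops: PySem slice with natural bounds)
def pvSub (cs : List Char) (i j : Nat) : String :=
  String.ofList (PySem.List.slice cs (some (i : Int)) (some ((j : Int) + 1)))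

-- inner loop `for j in range(i, n)` of the first pass, k iterations left, current j;
-- dp[i] = min(dp[i], dp[j+1]+1) under `prefix in number_set and dp[j+1] != inf`
def pvDpInnerA (cs : List Char) (S : PySem.Set String) (i : Nat) : Nat → Nat → List (Option Nat) → List (Option Nat)
  | _, 0, dp => dp
  | j, k+1, dp =>
      let dp' :=
        if PySem.Set.contains S (pvSub cs i j) ∧ dp.getD (j+1) none ≠ none then
          dp.set i (pvOmin (dp.getD i none) ((dp.getD (j+1) none).map (· + 1)))
        else dp
      pvDpInnerA cs S i (j+1) k dp'

-- outer loop `for i in range(n-1, -1, -1)`: with m iterations left the current index is m-1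
def pvDpOuterA (cs : List Char) (S : PySem.Set String) (n : Nat) : Nat → List (Option Nat) → List (Option Nat)
  | 0, dp => dp
  | m+1, dp => pvDpOuterA cs S n m (pvDpInnerA cs S m m (n - m) dp)

-- `collect(i, current)`; fuel is a totality device only (each call increases i, so n+1 suffices);
-- `expected = dp[i] - 1` is `.map (· - 1)` — exact: dp values reached here are ≥ 1 for i < n
def pvCollectA (cs : List Char) (S : PySem.Set String) (dp : List (Option Nat)) (n : Nat) :
    Nat → Nat → List String → List (List String)
  | 0, _, _ => []
  | fuel+1, i, current =>
      if i = n then [current]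
      else
        (List.range' i (n - i)).foldl (fun results j =>
          let pfx := pvSub cs i j
          if PySem.Set.contains S pfx ∧ dp.getD (j+1) none = (dp.getD i none).map (· - 1) then
            results ++ pvCollectA cs S dp n fuel (j+1) (current ++ [pfx])
          else results) []

def numbers_in_pi_all_solutions (pi : String) (numbers : List String) : List (List String) :=
  if pi.toList = [] then (if numbers = [] then [[]] else [])
  else
    let cs := pi.toList
    let S := PySem.Set.ofList numbers
    let n := cs.length
    let dp0 := (List.replicate (n+1) (none : Option Nat)).set n (some 0)
    let dp := pvDpOuterA cs S n n dp0
    if dp.getD 0 none = none then []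
    else pvCollectA cs S dp n (n+1) 0 []

-- ===== PORT B =====

-- sorted({len(x) for x in number_set if 0 < len(x) <= n}); the set's hash order is
-- consumed only by `sorted` with no key, so the result is order-independent
def pvLengthsB (S : PySem.Set String) (n : Nat) : List Nat :=
  PySem.List.sorted
    (PySem.Set.ofList (S.filterMap (fun x =>
      if 0 < x.toList.length ∧ x.toList.length ≤ n then some x.toList.length else none)))
    (fun x => x)

-- pi[i:j]  (j = i + L)
def pvSubB (cs : List Char) (i j : Nat) : String :=
  String.ofList (PySem.List.slice cs (some (i : Int)) (some (j : Int)))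

-- `best` accumulation over the candidate lengths at position i
def pvBestB (cs : List Char) (S : PySem.Set String) (lengths : List Nat) (n i : Nat)
    (dp : List (Option Nat)) : Option Nat :=
  lengths.foldl (fun best L =>
    let j := i + L
    if j ≤ n ∧ PySem.Set.contains S (pvSubB cs i j) then
      match dp.getD j none with
      | some v => match best with
        | none => some (v + 1)
        | some b => if v + 1 < b then some (v + 1) else some b
      | none => best
    else best) none

def pvDpOuterB (cs : List Char) (S : PySem.Set String) (lengths : List Nat) (n : Nat) :
    Nat → List (Option Nat) → List (Option Nat)
  | 0, dp => dp
  | m+1, dp => pvDpOuterB cs S lengths n m (dp.set m (pvBestB cs S lengths n m dp))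

-- one row of the solution table: the body of B's second loop at index i
-- (`dp[i] - 1` is Nat subtraction — exact: dp[i] ≥ 1 whenever i < n and dp[i] is not None)
def pvSolsRowB (cs : List Char) (S : PySem.Set String) (lengths : List Nat) (dp : List (Option Nat))
    (n i : Nat) (sols : List (List (List String))) : List (List String) :=
  match dp.getD i none with
  | none => []
  | some d =>
      lengths.foldl (fun res L =>
        let j := i + L
        let pfx := pvSubB cs i j
        if j ≤ n ∧ dp.getD j none = some (d - 1) ∧ PySem.Set.contains S pfx then
          res ++ (sols.getD j []).map (fun s => pfx :: s)
        else res) []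

def pvSolsOuterB (cs : List Char) (S : PySem.Set String) (lengths : List Nat) (dp : List (Option Nat))
    (n : Nat) : Nat → List (List (List String)) → List (List (List String))
  | 0, sols => sols
  | m+1, sols => pvSolsOuterB cs S lengths dp n m (sols.set m (pvSolsRowB cs S lengths dp n m sols))

def numbers_in_pi_all_solutions_alt (pi : String) (numbers : List String) : List (List String) :=
  let cs := pi.toList
  let n := cs.length
  let S := PySem.Set.ofList numbers
  let lengths := pvLengthsB S n
  let dp := pvDpOuterB cs S lengths n n ((List.replicate (n+1) (none : Option Nat)).set n (some 0))
  if dp.getD 0 none = none then []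
  else
    let sols := pvSolsOuterB cs S lengths dp n n
      ((List.replicate (n+1) ([] : List (List String))).set n [[]])
    sols.getD 0 []

-- ===== PRECONDITION & SPEC =====

-- On pi = "" with numbers ≠ [] A returns [] while B returns [[]]; the empty string has exactly
-- one minimal decomposition (the empty split, consistent with A's own dp[n] = 0 base case),
-- so B's value is the intended one.
def D_numbers_in_pi_all_solutions (pi : String) (numbers : List String) : Prop :=
  pi = "" ∧ numbers ≠ []
instance (pi : String) (numbers : List String) : Decidable (D_numbers_in_pi_all_solutions pi numbers) := by
  unfold D_numbers_in_pi_all_solutions; infer_instance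

def Spec_numbers_in_pi_all_solutions (pi : String) (numbers : List String) (out : List (List String)) : Prop :=
  ¬ D_numbers_in_pi_all_solutions pi numbers → out = numbers_in_pi_all_solutions_alt pi numbers
instance (pi : String) (numbers : List String) (out : List (List String)) : Decidable (Spec_numbers_in_pi_all_solutions pi numbers out) := by
  unfold Spec_numbers_in_pi_all_solutions; infer_instance

def pvDiffWitness_numbers_in_pi_all_solutions : String × List String := ("", ["1"])
def pvDiffWitnessOut_numbers_in_pi_all_solutions : (List (List String)) × (List (List String)) := ([], [[]])

-- ===== CLAIM (what is proved, stated in full; the proofs are below) =====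
def Claim_unchanged_numbers_in_pi_all_solutions : Prop := ∀ (pi : String) (numbers : List String), Dom_numbers_in_pi_all_solutions pi numbers → Spec_numbers_in_pi_all_solutions pi numbers (numbers_in_pi_all_solutions pi numbers)
def Claim_changed_numbers_in_pi_all_solutions : Prop := Dom_numbers_in_pi_all_solutions (pvDiffWitness_numbers_in_pi_all_solutions.1) (pvDiffWitness_numbers_in_pi_all_solutions.2) ∧ D_numbers_in_pi_all_solutions (pvDiffWitness_numbers_in_pi_all_solutions.1) (pvDiffWitness_numbers_in_pi_all_solutions.2) ∧ numbers_in_pi_all_solutions (pvDiffWitness_numbers_in_pi_all_solutions.1) (pvDiffWitness_numbers_in_pi_all_solutions.2) = pvDiffWitnessOut_numbers_in_pi_all_solutions.1 ∧ numbers_in_pi_all_solutions_alt (pvDiffWitness_numbers_in_pi_all_solutions.1) (pvDiffWitness_numbers_in_pi_all_solutions.2) = pvDiffWitnessOut_numbers_in_pi_all_solutions.2 ∧ pvDiffWitnessOut_numbers_in_pi_all_solutions.1 ≠ pvDiffWitnessOut_numbers_in_pi_all_solutions.2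
def Claim_exact_numbers_in_pi_all_solutions : Prop := ∀ (pi : String) (numbers : List String), Dom_numbers_in_pi_all_solutions pi numbers → D_numbers_in_pi_all_solutions pi numbers → numbers_in_pi_all_solutions pi numbers ≠ numbers_in_pi_all_solutions_alt pi numbers


-- ===== LEMMAS AND PROOFS =====

theorem pv_alt_empty (numbers : List String) :
    numbers_in_pi_all_solutions_alt "" numbers = [[]] := by
  rfl

-- getD / set toolkit
theorem pv_getD_set_ne {α : Type} (l : List α) (i j : Nat) (v d : α) (h : i ≠ j) :
    (l.set i v).getD j d = l.getD j d := by
  simp [List.getD_eq_getElem?_getD, List.getElem?_set_ne h]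

theorem pv_getD_set_self {α : Type} (l : List α) (i : Nat) (v d : α) (h : i < l.length) :
    (l.set i v).getD i d = v := by
  simp [List.getD_eq_getElem?_getD, h]

theorem pv_set_getD_self {α : Type} (l : List α) (i : Nat) (d : α) (h : i < l.length) :
    l.set i (l.getD i d) = l := by
  rw [List.getD_eq_getElem l d h]; exact List.set_getElem_self h

theorem pv_getD_replicate {α : Type} (n i : Nat) (a d : α) (h : i < n) :
    (List.replicate n a).getD i d = a := by
  simp [List.getD_eq_getElem?_getD, h]

-- the substrings both ports take, in drop/take normal form
theorem pv_sub_eq (cs : List Char) (i j : Nat) :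
    pvSub cs i j = String.ofList ((cs.drop i).take (j + 1 - i)) := by
  unfold pvSub
  have h := PySem.List.slice_natCast (xs := cs) (a := i) (b := j + 1)
  push_cast at h
  rw [h]

theorem pv_subB_eq (cs : List Char) (i L : Nat) :
    pvSubB cs i (i + L) = String.ofList ((cs.drop i).take L) := by
  unfold pvSubB
  rw [show ((i + L : Nat) : Int) = (i : Int) + (L : Int) by push_cast; ring,
    PySem.List.slice_natCast_add cs i L]

-- the candidate lengths at position i: those L for which pi[i:i+L] is a listed number
def pvCand (cs : List Char) (S : PySem.Set String) (i : Nat) : List Nat :=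
  (List.range' 1 (cs.length - i)).filter
    (fun L => PySem.Set.contains S (String.ofList ((cs.drop i).take L)))

theorem pv_mem_lengths (S : PySem.Set String) (n L : Nat) :
    L ∈ pvLengthsB S n ↔ (0 < L ∧ L ≤ n ∧ ∃ x ∈ S, x.toList.length = L) := by
  unfold pvLengthsB
  rw [PySem.List.mem_sorted, PySem.Set.mem_ofList, List.mem_filterMap]
  constructor
  · rintro ⟨x, hx, hif⟩
    split_ifs at hif with hc
    · obtain ⟨h1, h2⟩ := hc
      cases hif
      exact ⟨h1, h2, x, hx, rfl⟩
  · rintro ⟨h1, h2, x, hx, hlen⟩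
    refine ⟨x, hx, ?_⟩
    rw [hlen, if_pos ⟨h1, h2⟩]

theorem pv_lengths_pos (S : PySem.Set String) (n L : Nat) (h : L ∈ pvLengthsB S n) : 0 < L :=
  ((pv_mem_lengths S n L).mp h).1

theorem pv_lengths_pairwise (S : PySem.Set String) (n : Nat) :
    (pvLengthsB S n).Pairwise (· < ·) := by
  unfold pvLengthsB
  exact PySem.List.sorted_ofList_pairwise_lt _

-- two strictly increasing lists with the same members are equal
theorem pv_eq_of_mem_iff_pairwise_lt (l1 l2 : List Nat) (pw1 : l1.Pairwise (· < ·))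
    (pw2 : l2.Pairwise (· < ·)) (h : ∀ x, x ∈ l1 ↔ x ∈ l2) : l1 = l2 :=
  ((List.perm_ext_iff_of_nodup (pw1.imp Nat.ne_of_lt) (pw2.imp Nat.ne_of_lt)).mpr h).eq_of_pairwise
    (fun _ _ _ _ hab hba => absurd hba (not_lt.mpr hab.le)) pw1 pw2

-- the filtered length list B scans at position i IS pvCand (same elements, both strictly sorted)
theorem pv_candB (cs : List Char) (S : PySem.Set String) (i : Nat) (hi : i ≤ cs.length) :
    (pvLengthsB S cs.length).filter
      (fun L => decide (i + L ≤ cs.length ∧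
        PySem.Set.contains S (String.ofList ((cs.drop i).take L)))) = pvCand cs S i := by
  refine pv_eq_of_mem_iff_pairwise_lt _ _ ((pv_lengths_pairwise S cs.length).filter _)
    (List.Pairwise.filter _ List.pairwise_lt_range') ?_
  intro L
  simp only [List.mem_filter, decide_eq_true_eq, pvCand, List.mem_range'_1]
  constructor
  · rintro ⟨hmem, hle, hcont⟩
    have hpos := pv_lengths_pos S cs.length L hmem
    exact ⟨⟨hpos, by omega⟩, hcont⟩
  · rintro ⟨⟨h1, h2⟩, hcont⟩
    have hle : i + L ≤ cs.length := by omega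
    refine ⟨?_, hle, hcont⟩
    rw [pv_mem_lengths]
    refine ⟨h1, by omega, String.ofList ((cs.drop i).take L), ?_, ?_⟩
    · exact (PySem.Set.contains_iff S _).mp hcont
    · simp; omega

-- A's inner dp loop only rewrites slot i, accumulating a fold over the scanned j's
theorem pv_dpInnerA_eq (cs : List Char) (S : PySem.Set String) (i : Nat) :
    ∀ (k j : Nat) (dp : List (Option Nat)), i ≤ j → i < dp.length →
    pvDpInnerA cs S i j k dp = dp.set i ((List.range' j k).foldl
      (fun acc jj =>
        if PySem.Set.contains S (pvSub cs i jj) ∧ dp.getD (jj+1) none ≠ none then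
          pvOmin acc ((dp.getD (jj+1) none).map (· + 1))
        else acc) (dp.getD i none)) := by
  intro k
  induction k with
  | zero =>
    intro j dp _ hlen
    rw [show pvDpInnerA cs S i j 0 dp = dp from rfl, List.range'_zero, List.foldl_nil,
      pv_set_getD_self dp i none hlen]
  | succ k ih =>
    intro j dp hij hlen
    rw [List.range'_succ, List.foldl_cons]
    by_cases hc : PySem.Set.contains S (pvSub cs i j) ∧ dp.getD (j+1) none ≠ none
    · have step : pvDpInnerA cs S i j (k+1) dp
          = pvDpInnerA cs S i (j+1) k (dp.set i (pvOmin (dp.getD i none) ((dp.getD (j+1) none).map (· + 1)))) := by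
        simp only [pvDpInnerA, if_pos hc]
      rw [step, ih (j+1) _ (by omega) (by simpa using hlen), List.set_set]
      set v0 := pvOmin (dp.getD i none) ((dp.getD (j+1) none).map (· + 1)) with hv0
      have hfold : ∀ (acc : Option Nat) (jj : Nat), jj ∈ List.range' (j+1) k →
          (if PySem.Set.contains S (pvSub cs i jj) ∧ (dp.set i v0).getD (jj+1) none ≠ none then
            pvOmin acc (((dp.set i v0).getD (jj+1) none).map (· + 1)) else acc)
          = (if PySem.Set.contains S (pvSub cs i jj) ∧ dp.getD (jj+1) none ≠ none then
            pvOmin acc ((dp.getD (jj+1) none).map (· + 1)) else acc) := by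
        intro acc jj hjj
        have h1 : i ≠ jj + 1 := by have := (List.mem_range'_1.mp hjj).1; omega
        rw [pv_getD_set_ne dp i (jj+1) v0 none h1]
      rw [pv_getD_set_self dp i v0 none hlen]
      congr 1
      rw [if_pos hc]
      exact PySem.List.foldl_congr_mem _ _ _ _ hfold
    · have step : pvDpInnerA cs S i j (k+1) dp = pvDpInnerA cs S i (j+1) k dp := by
        simp only [pvDpInnerA, if_neg hc]
      rw [step, ih (j+1) dp (by omega) hlen]
      congr 1
      rw [if_neg hc]

-- at each position A's j-scan computes exactly B's best-over-candidate-lengths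
theorem pv_step_dp (cs : List Char) (S : PySem.Set String) (i : Nat) (dp : List (Option Nat))
    (hi : i < cs.length) (hlen : dp.length = cs.length + 1) (h0 : dp.getD i none = none) :
    pvDpInnerA cs S i i (cs.length - i) dp
      = dp.set i (pvBestB cs S (pvLengthsB S cs.length) cs.length i dp) := by
  rw [pv_dpInnerA_eq cs S i (cs.length - i) i dp (Nat.le_refl i) (by omega), h0]
  congr 1
  -- reindex A's scan from end positions j to lengths L = j + 1 - i
  have hA : (List.range' i (cs.length - i)).foldl
      (fun acc jj =>
        if PySem.Set.contains S (pvSub cs i jj) ∧ dp.getD (jj+1) none ≠ none then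
          pvOmin acc ((dp.getD (jj+1) none).map (· + 1))
        else acc) none
      = (List.range' 1 (cs.length - i)).foldl
      (fun acc L =>
        if PySem.Set.contains S (String.ofList ((cs.drop i).take L)) ∧ dp.getD (i+L) none ≠ none then
          pvOmin acc ((dp.getD (i+L) none).map (· + 1))
        else acc) none := by
    rw [List.range'_eq_map_range (s := i), List.range'_eq_map_range (s := 1),
      List.foldl_map, List.foldl_map]
    refine PySem.List.foldl_congr_mem _ _ _ _ ?_
    intro acc t _
    rw [pv_sub_eq, show i + t + 1 - i = 1 + t by omega, show i + t + 1 = i + (1 + t) by omega]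
  rw [hA]
  -- push the prefix-membership test into a filter: the fold runs over pvCand
  have hsplit : (List.range' 1 (cs.length - i)).foldl
      (fun acc L =>
        if PySem.Set.contains S (String.ofList ((cs.drop i).take L)) ∧ dp.getD (i+L) none ≠ none then
          pvOmin acc ((dp.getD (i+L) none).map (· + 1))
        else acc) none
      = (pvCand cs S i).foldl
      (fun acc L =>
        if dp.getD (i+L) none ≠ none then pvOmin acc ((dp.getD (i+L) none).map (· + 1)) else acc)
        none := by
    rw [PySem.List.foldl_congr_mem _ _
      (fun acc L =>
        if PySem.Set.contains S (String.ofList ((cs.drop i).take L)) = true then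
          (if dp.getD (i+L) none ≠ none then pvOmin acc ((dp.getD (i+L) none).map (· + 1)) else acc)
        else acc) _
      (by intro acc L _; beta_reduce; split_ifs <;> first | rfl | tauto),
      PySem.List.foldl_if_eq_foldl_filter]
    rfl
  rw [hsplit]
  -- B's fold, same normal form
  unfold pvBestB
  have hB : (pvLengthsB S cs.length).foldl
      (fun best L =>
        let j := i + L
        if j ≤ cs.length ∧ PySem.Set.contains S (pvSubB cs i j) then
          match dp.getD j none with
          | some v => match best with
            | none => some (v + 1)
            | some b => if v + 1 < b then some (v + 1) else some b
          | none => best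
        else best) none
      = (pvCand cs S i).foldl
      (fun best L =>
        match dp.getD (i+L) none with
        | some v => match best with
          | none => some (v + 1)
          | some b => if v + 1 < b then some (v + 1) else some b
        | none => best) none := by
    rw [PySem.List.foldl_congr_mem _ _
      (fun best L =>
        if i + L ≤ cs.length ∧ PySem.Set.contains S (String.ofList ((cs.drop i).take L)) then
          match dp.getD (i+L) none with
          | some v => match best with
            | none => some (v + 1)
            | some b => if v + 1 < b then some (v + 1) else some b
          | none => best
        else best) _
      (by intro acc L _; dsimp only; rw [pv_subB_eq]),
      PySem.List.foldl_ite_eq_foldl_filter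
        (p := fun L => i + L ≤ cs.length ∧ PySem.Set.contains S (String.ofList ((cs.drop i).take L))),
      pv_candB cs S i (by omega)]
  rw [hB]
  -- pointwise: running min with +1 = B's best update
  refine PySem.List.foldl_congr_mem _ _ _ _ ?_
  intro acc L _
  cases hv : dp.getD (i+L) none with
  | none => simp
  | some v =>
    cases acc with
    | none => simp [pvOmin]
    | some b =>
      simp only [ne_eq, reduceCtorEq, not_false_eq_true, if_pos, pvOmin, Option.map_some]
      rcases Nat.lt_or_ge (v + 1) b with h | h
      · rw [Nat.min_eq_right h.le, if_pos h]
      · rw [Nat.min_eq_left h, if_neg (Nat.not_lt.mpr h)]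

-- the two first passes build the same dp table
theorem pv_dp_eq (cs : List Char) (S : PySem.Set String) :
    ∀ (m : Nat), m ≤ cs.length → ∀ (dp : List (Option Nat)), dp.length = cs.length + 1 →
    (∀ i, i < m → dp.getD i none = none) →
    pvDpOuterA cs S cs.length m dp = pvDpOuterB cs S (pvLengthsB S cs.length) cs.length m dp := by
  intro m
  induction m with
  | zero => intro _ dp _ _; rfl
  | succ m ih =>
    intro hm dp hlen hnone
    show pvDpOuterA cs S cs.length m (pvDpInnerA cs S m m (cs.length - m) dp)
      = pvDpOuterB cs S (pvLengthsB S cs.length) cs.length m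
          (dp.set m (pvBestB cs S (pvLengthsB S cs.length) cs.length m dp))
    rw [pv_step_dp cs S m dp (by omega) hlen (hnone m (by omega))]
    refine ih (by omega) _ (by simpa using hlen) ?_
    intro i hi
    rw [pv_getD_set_ne _ m i _ none (by omega), hnone i (by omega)]

-- the second pass never touches rows at or above the loop index
theorem pv_sols_stable (cs : List Char) (S : PySem.Set String) (lengths : List Nat)
    (dp : List (Option Nat)) (n : Nat) :
    ∀ (m : Nat) (s : List (List (List String))) (j : Nat) (d : List (List String)), m ≤ j →
    (pvSolsOuterB cs S lengths dp n m s).getD j d = s.getD j d := by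
  intro m
  induction m with
  | zero => intro s j d _; rfl
  | succ m ih =>
    intro s j d hj
    show (pvSolsOuterB cs S lengths dp n m (s.set m (pvSolsRowB cs S lengths dp n m s))).getD j d
      = s.getD j d
    rw [ih _ j d (by omega), pv_getD_set_ne _ m j _ d (by omega)]

-- a row depends only on strictly higher rows
theorem pv_row_congr (cs : List Char) (S : PySem.Set String) (lengths : List Nat)
    (dp : List (Option Nat)) (n i : Nat) (s s' : List (List (List String)))
    (hpos : ∀ L ∈ lengths, 0 < L)
    (h : ∀ j, i < j → s.getD j [] = s'.getD j []) :
    pvSolsRowB cs S lengths dp n i s = pvSolsRowB cs S lengths dp n i s' := by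
  unfold pvSolsRowB
  cases dp.getD i none with
  | none => rfl
  | some d =>
    refine PySem.List.foldl_congr_mem _ _ _ _ ?_
    intro acc L hL
    dsimp only
    rw [h (i + L) (by have := hpos L hL; omega)]

-- every computed row of the final solution table satisfies the row equation ON the final table
theorem pv_sols_fix (cs : List Char) (S : PySem.Set String) (lengths : List Nat)
    (dp : List (Option Nat)) (n : Nat) (hpos : ∀ L ∈ lengths, 0 < L) :
    ∀ (m : Nat), m ≤ n → ∀ (s : List (List (List String))), s.length = n + 1 →
    ∀ i, i < m → (pvSolsOuterB cs S lengths dp n m s).getD i []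
      = pvSolsRowB cs S lengths dp n i (pvSolsOuterB cs S lengths dp n m s) := by
  intro m
  induction m with
  | zero => intro _ _ _ i hi; omega
  | succ m ih =>
    intro hm s hlen i hi
    show (pvSolsOuterB cs S lengths dp n m (s.set m (pvSolsRowB cs S lengths dp n m s))).getD i []
      = pvSolsRowB cs S lengths dp n i
          (pvSolsOuterB cs S lengths dp n m (s.set m (pvSolsRowB cs S lengths dp n m s)))
    rcases Nat.lt_or_ge i m with him | him
    · exact ih (by omega) _ (by simpa using hlen) i him
    · have hieq : i = m := by omega
      subst hieq
      rw [pv_sols_stable cs S lengths dp n i _ i [] (Nat.le_refl i),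
        pv_getD_set_self _ i _ [] (by omega)]
      refine pv_row_congr cs S lengths dp n i _ _ hpos ?_
      intro j hj
      rw [pv_sols_stable cs S lengths dp n i _ j [] (by omega),
        pv_getD_set_ne _ i j _ [] (by omega)]

-- the final solution table of B
def pvSolsT (cs : List Char) (S : PySem.Set String) (T : List (Option Nat)) : List (List (List String)) :=
  pvSolsOuterB cs S (pvLengthsB S cs.length) T cs.length cs.length
    ((List.replicate (cs.length + 1) ([] : List (List String))).set cs.length [[]])

theorem pv_solsT_top (cs : List Char) (S : PySem.Set String) (T : List (Option Nat)) :
    (pvSolsT cs S T).getD cs.length [] = [[]] := by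
  unfold pvSolsT
  rw [pv_sols_stable _ _ _ _ _ cs.length _ cs.length [] (Nat.le_refl _),
    pv_getD_set_self _ cs.length _ [] (by simp)]

theorem pv_collect_eq (cs : List Char) (S : PySem.Set String) (T : List (Option Nat)) :
    ∀ (fuel i : Nat) (current : List String), i ≤ cs.length → cs.length - i < fuel →
    T.getD i none ≠ none →
    pvCollectA cs S T cs.length fuel i current
      = ((pvSolsT cs S T).getD i []).map (current ++ ·) := by
  intro fuel
  induction fuel with
  | zero => intro i current _ h2 _; omega
  | succ fuel ih =>
    intro i current hi hfuel hT
    by_cases hin : i = cs.length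
    · subst hin
      simp only [pvCollectA, pv_solsT_top]
      simp
    · have hilt : i < cs.length := by omega
      obtain ⟨d, hd⟩ : ∃ d, T.getD i none = some d := by
        cases h : T.getD i none with
        | none => exact absurd h hT
        | some d => exact ⟨d, rfl⟩
      simp only [pvCollectA, if_neg hin]
      -- A: reindex the j-scan into a scan over lengths L = j + 1 - i
      have stepA1 : (List.range' i (cs.length - i)).foldl
          (fun results j =>
            let pfx := pvSub cs i j
            if PySem.Set.contains S pfx ∧ T.getD (j+1) none = (T.getD i none).map (· - 1) then
              results ++ pvCollectA cs S T cs.length fuel (j+1) (current ++ [pfx])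
            else results) []
          = (List.range' 1 (cs.length - i)).foldl
          (fun results L =>
            if PySem.Set.contains S (String.ofList ((cs.drop i).take L)) = true then
              (if T.getD (i+L) none = some (d-1) then
                results ++ pvCollectA cs S T cs.length fuel (i+L)
                  (current ++ [String.ofList ((cs.drop i).take L)])
              else results)
            else results) [] := by
        rw [List.range'_eq_map_range (s := i), List.range'_eq_map_range (s := 1),
          List.foldl_map, List.foldl_map]
        refine PySem.List.foldl_congr_mem _ _ _ _ ?_
        intro acc t _
        dsimp only
        rw [pv_sub_eq, hd, show i + t + 1 - i = 1 + t by omega,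
          show i + t + 1 = i + (1 + t) by omega]
        simp only [Option.map_some]
        split_ifs <;> first | rfl | tauto
      rw [stepA1,
        PySem.List.foldl_if_eq_foldl_filter
          (p := fun L => PySem.Set.contains S (String.ofList ((cs.drop i).take L))),
        PySem.List.foldl_ite_eq_foldl_filter
          (p := fun L => T.getD (i+L) none = some (d-1)),
        PySem.List.foldl_append_eq_flatMap, List.nil_append]
      -- B: the final table's row i, in the same normal form
      have hrow : (pvSolsT cs S T).getD i []
          = pvSolsRowB cs S (pvLengthsB S cs.length) T cs.length i (pvSolsT cs S T) :=
        pv_sols_fix cs S (pvLengthsB S cs.length) T cs.length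
          (fun L hL => pv_lengths_pos S cs.length L hL) cs.length (Nat.le_refl _)
          _ (by simp) i hilt
      have hRHS : pvSolsRowB cs S (pvLengthsB S cs.length) T cs.length i (pvSolsT cs S T)
          = ((pvCand cs S i).filter
              (fun L => decide (T.getD (i + L) none = some (d - 1)))).flatMap
              (fun L => ((pvSolsT cs S T).getD (i+L) []).map
                (fun s => String.ofList ((cs.drop i).take L) :: s)) := by
        unfold pvSolsRowB
        rw [hd]
        have stepB1 : (pvLengthsB S cs.length).foldl
            (fun res L =>
              if i + L ≤ cs.length ∧ T.getD (i + L) none = some (d - 1) ∧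
                  PySem.Set.contains S (pvSubB cs i (i + L)) then
                res ++ ((pvSolsT cs S T).getD (i + L) []).map (fun s => pvSubB cs i (i + L) :: s)
              else res) []
            = (pvLengthsB S cs.length).foldl
            (fun res L =>
              if i + L ≤ cs.length ∧
                  PySem.Set.contains S (String.ofList ((cs.drop i).take L)) = true then
                (if T.getD (i+L) none = some (d-1) then
                  res ++ ((pvSolsT cs S T).getD (i+L) []).map
                    (fun s => String.ofList ((cs.drop i).take L) :: s)
                else res)
              else res) [] := by
          refine PySem.List.foldl_congr_mem _ _ _ _ ?_
          intro acc L _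
          rw [pv_subB_eq]
          split_ifs <;> first | rfl | tauto
        rw [show (match some d with
            | none => ([] : List (List String))
            | some d => (pvLengthsB S cs.length).foldl
              (fun res L =>
                let j := i + L
                let pfx := pvSubB cs i j
                if j ≤ cs.length ∧ T.getD j none = some (d - 1) ∧ PySem.Set.contains S pfx then
                  res ++ ((pvSolsT cs S T).getD j []).map (fun s => pfx :: s)
                else res) [])
            = (pvLengthsB S cs.length).foldl
              (fun res L =>
                if i + L ≤ cs.length ∧ T.getD (i + L) none = some (d - 1) ∧
                    PySem.Set.contains S (pvSubB cs i (i + L)) then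
                  res ++ ((pvSolsT cs S T).getD (i + L) []).map (fun s => pvSubB cs i (i + L) :: s)
                else res) [] from rfl,
          stepB1,
          PySem.List.foldl_ite_eq_foldl_filter
            (p := fun L => i + L ≤ cs.length ∧
              PySem.Set.contains S (String.ofList ((cs.drop i).take L)) = true),
          pv_candB cs S i (by omega),
          PySem.List.foldl_ite_eq_foldl_filter
            (p := fun L => T.getD (i+L) none = some (d-1)),
          PySem.List.foldl_append_eq_flatMap, List.nil_append]
      rw [hrow, hRHS, List.map_flatMap]
      -- same candidate list on both sides; rewrite each summand with the induction hypothesis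
      unfold pvCand
      refine List.flatMap_congr ?_
      intro L hL
      have hmem := (List.mem_filter.mp hL)
      have hQ : T.getD (i+L) none = some (d-1) := by
        have := hmem.2; simpa using this
      have hrange := List.mem_range'_1.mp (List.mem_filter.mp hmem.1).1
      rw [ih (i+L) (current ++ [String.ofList ((cs.drop i).take L)]) (by omega) (by omega)
        (by rw [hQ]; simp), List.map_map]
      refine List.map_congr_left ?_
      intro s _
      simp [Function.comp, List.append_assoc]

-- ===== VERDICT (by name: the statement is the Claim_ definition above) =====
theorem numbers_in_pi_all_solutions_spec : Claim_unchanged_numbers_in_pi_all_solutions := by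
  intro pi numbers _ hnd
  by_cases hpi : pi = ""
  · have hnum : numbers = [] := by
      by_contra h
      exact hnd ⟨hpi, h⟩
    subst hpi; subst hnum
    decide
  · have hcs : pi.toList ≠ [] := by
      intro h
      exact hpi (by simpa using h)
    show numbers_in_pi_all_solutions pi numbers = numbers_in_pi_all_solutions_alt pi numbers
    unfold numbers_in_pi_all_solutions numbers_in_pi_all_solutions_alt
    dsimp only
    rw [if_neg hcs]
    have hdp := pv_dp_eq pi.toList (PySem.Set.ofList numbers) pi.toList.length (Nat.le_refl _)
      ((List.replicate (pi.toList.length + 1) (none : Option Nat)).set pi.toList.length (some 0))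
      (by simp)
      (fun i hi => by
        rw [pv_getD_set_ne _ _ i _ none (by omega), pv_getD_replicate _ i _ none (by omega)])
    rw [hdp]
    by_cases hz : (pvDpOuterB pi.toList (PySem.Set.ofList numbers)
        (pvLengthsB (PySem.Set.ofList numbers) pi.toList.length) pi.toList.length pi.toList.length
        ((List.replicate (pi.toList.length + 1) (none : Option Nat)).set pi.toList.length
          (some 0))).getD 0 none = none
    · rw [if_pos hz, if_pos hz]
    · rw [if_neg hz, if_neg hz,
        pv_collect_eq pi.toList (PySem.Set.ofList numbers) _ (pi.toList.length + 1) 0 []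
          (by omega) (by omega) hz]
      show List.map _ ((pvSolsT pi.toList (PySem.Set.ofList numbers) _).getD 0 []) = _
      simp [pvSolsT]
theorem numbers_in_pi_all_solutions_changed : Claim_changed_numbers_in_pi_all_solutions := by
  unfold Claim_changed_numbers_in_pi_all_solutions; decide
theorem numbers_in_pi_all_solutions_tight : Claim_exact_numbers_in_pi_all_solutions := by
  intro pi numbers _ hd
  obtain ⟨hpi, hne⟩ := hd
  subst hpi
  rw [pv_alt_empty]
  simp [numbers_in_pi_all_solutions, hne]
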